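-- pv_equiv track=rewrite | github.com/thechdharm/LearningPython | Preparation_2025_V2/Interviews/ChadInterview/firstround.py | leftover_bruiteforce
-- ===== SOURCE A (Python) =====
-- def leftover_bruiteforce(n):
--     people = list(range(1, n+1))
--     skip = 1
--     idx = 0
--
--     while len(people) > 1:
--         people.pop(idx)
--
--         if len(people) == 1:
--             break
--
--         idx = (idx + skip) % len(people)
--         skip += 1
--
--     return people[0]
-- ===== SOURCE B (Python) =====
-- def leftover_bruiteforce(n):
--     # Forward pass: record the removal index at each elimination step (O(1) each).
--     idxs = []
--     idx = 0
--     skip = 1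
--     remaining = n
--     while remaining > 1:
--         idxs.append(idx)
--         remaining -= 1
--         if remaining == 1:
--             break
--         idx = (idx + skip) % remaining
--         skip += 1
--     # Backward pass: reconstruct the survivor's position in the original list.
--     p = 0
--     for i in reversed(idxs):
--         if p >= i:
--             p += 1
--     return p + 1
-- ===== Notes on version B (the rewrite author's own statement) =====
-- stated objective: faster
-- what changed: A simulates the elimination on a list with O(n) pops; B records each step's removal index in a forward arithmetic pass and reconstructs the survivor's position in the original line with a backward pass, O(1) per step.
import Mathlib
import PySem

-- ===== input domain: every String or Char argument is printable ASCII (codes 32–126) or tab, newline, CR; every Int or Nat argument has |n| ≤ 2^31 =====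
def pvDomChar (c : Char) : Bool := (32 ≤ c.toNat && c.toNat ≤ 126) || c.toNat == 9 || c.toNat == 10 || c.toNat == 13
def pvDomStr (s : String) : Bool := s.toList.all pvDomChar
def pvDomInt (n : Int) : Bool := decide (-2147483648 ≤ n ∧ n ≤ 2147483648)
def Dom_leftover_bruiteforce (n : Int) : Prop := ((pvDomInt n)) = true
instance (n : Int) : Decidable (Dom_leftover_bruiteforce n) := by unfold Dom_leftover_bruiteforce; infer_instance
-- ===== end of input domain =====

-- B replaces A's pop-list simulation by two arithmetic passes: a forward pass recording
-- each step's removal index, and a backward pass reconstructing the survivor's position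
-- in the original line (objective: faster).

-- ===== PORT A =====
-- while-loop of A; the Python list is modelled as an Array Int.
-- In the loop idx is always a nonnegative in-range remainder (idx = 0 at entry, then a
-- mod by the positive length), so list.pop's negative-index wrap and its IndexError are
-- unreachable; the 0-result guard below only makes the recursion total.
def pvALoop (people : Array Int) (idx skip : Int) : Int :=
  if _h : people.size > 1 then
    if hidx : 0 ≤ idx ∧ idx.toNat < people.size then
      let rest := people.eraseIdx idx.toNat hidx.2   -- people.pop(idx)
      if rest.size = 1 then (rest[0]?).getD 0
      else pvALoop rest (PySem.Int.mod (idx + skip) (rest.size : Int)) (skip + 1)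
    else 0
  else (people[0]?).getD 0   -- people[0]; .getD 0 only hit when A raises IndexError (n ≤ 0)
termination_by people.size
decreasing_by simp [Array.size_eraseIdx]; omega

def leftover_bruiteforce (n : Int) : Int :=
  pvALoop (PySem.List.pyRange 1 (n + 1) 1).toArray 0 1

-- ===== PORT B =====
-- forward pass of Source B: record the removal index of every elimination step
def pvForward (idxs : Array Int) (idx skip remaining : Int) : Array Int :=
  if _h : remaining > 1 then
    let idxs2 := idxs.push idx
    if remaining - 1 = 1 then idxs2
    else pvForward idxs2 (PySem.Int.mod (idx + skip) (remaining - 1)) (skip + 1) (remaining - 1)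
  else idxs
termination_by remaining.toNat
decreasing_by omega

-- backward pass of Source B ('for i in reversed(idxs)' = foldr), then return p + 1
def leftover_bruiteforce_alt (n : Int) : Int :=
  ((pvForward #[] 0 1 n).foldr (fun i p => if p ≥ i then p + 1 else p) 0) + 1

-- ===== PRECONDITION & SPEC =====
-- Pre_ excludes n ≤ 0, where A's people list is empty and people[0] raises IndexError.
def Pre_leftover_bruiteforce (n : Int) : Prop := 1 ≤ n
instance (n : Int) : Decidable (Pre_leftover_bruiteforce n) := by unfold Pre_leftover_bruiteforce; infer_instance
def pvWitness_leftover_bruiteforce : Int := 5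

def Spec_leftover_bruiteforce (n : Int) (out : Int) : Prop := out = leftover_bruiteforce_alt n
instance (n : Int) (out : Int) : Decidable (Spec_leftover_bruiteforce n out) := by unfold Spec_leftover_bruiteforce; infer_instance

-- ===== CLAIM (what is proved, stated in full; the proofs are below) =====
def Claim_equal_leftover_bruiteforce : Prop := ∀ (n : Int), Dom_leftover_bruiteforce n → Pre_leftover_bruiteforce n → Spec_leftover_bruiteforce n (leftover_bruiteforce n)

-- ===== LEMMAS AND PROOFS =====
-- List-level twins of the two ports, used only to carry the equivalence proof
def pvALoopL (people : List Int) (idx skip : Int) : Int :=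
  if _h : people.length > 1 then
    match hp : PySem.List.pop? people idx with
    | none => 0
    | some (_, rest) =>
      if rest.length = 1 then (PySem.List.pyGet? rest 0).getD 0
      else pvALoopL rest (PySem.Int.mod (idx + skip) (rest.length : Int)) (skip + 1)
  else (PySem.List.pyGet? people 0).getD 0
termination_by people.length
decreasing_by have := PySem.List.length_of_pop?_eq_some _ hp; simp at this; omega

def pvForwardL (idxs : List Int) (idx skip remaining : Int) : List Int :=
  if _h : remaining > 1 then
    let idxs2 := idxs ++ [idx]
    if remaining - 1 = 1 then idxs2
    else pvForwardL idxs2 (PySem.Int.mod (idx + skip) (remaining - 1)) (skip + 1) (remaining - 1)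
  else idxs
termination_by remaining.toNat
decreasing_by omega

-- the backward pass over a list of recorded removal indices
def pvBack (l : List Int) : Int :=
  l.foldr (fun i p => if p ≥ i then p + 1 else p) 0

theorem pvForwardL_nil (idxs : List Int) (idx skip remaining : Int) (h : ¬ remaining > 1) :
    pvForwardL idxs idx skip remaining = idxs := by
  rw [pvForwardL]; simp [dif_neg h]

-- the accumulator of the forward pass is a pure prefix
theorem pvForwardL_acc (k : Nat) : ∀ (remaining : Int), remaining.toNat = k →
    ∀ (idxs : List Int) (idx skip : Int),
    pvForwardL idxs idx skip remaining = idxs ++ pvForwardL [] idx skip remaining := by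
  induction k using Nat.strong_induction_on with
  | _ k IH =>
    intro r hk idxs idx skip
    by_cases h : r > 1
    · conv_lhs => rw [pvForwardL]
      conv_rhs => rw [pvForwardL]
      simp only [dif_pos h]
      by_cases h2 : r - 1 = 1
      · simp [h2]
      · simp only [if_neg h2]
        rw [IH (r - 1).toNat (by omega) (r - 1) rfl,
            IH (r - 1).toNat (by omega) (r - 1) rfl ([] ++ [idx])]
        simp
    · rw [pvForwardL_nil _ _ _ _ h, pvForwardL_nil _ _ _ _ h]; simp

-- one-step recurrence of the survivor position
theorem pvBack_forward_step (idx skip r : Int) (hr : r > 1) :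
    pvBack (pvForwardL [] idx skip r) =
      (fun p => if p ≥ idx then p + 1 else p)
        (pvBack (pvForwardL [] (PySem.Int.mod (idx + skip) (r - 1)) (skip + 1) (r - 1))) := by
  rw [pvForwardL]
  simp only [dif_pos hr]
  by_cases h2 : r - 1 = 1
  · rw [if_pos h2, pvForwardL_nil _ _ _ _ (by omega)]
    simp [pvBack]
  · rw [if_neg h2, pvForwardL_acc (r - 1).toNat (r - 1) rfl]
    simp [pvBack]

theorem pvBack_forward_bounds (k : Nat) : ∀ (r : Int), r.toNat = k → ∀ (idx skip : Int), 1 ≤ r →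
    0 ≤ pvBack (pvForwardL [] idx skip r) ∧ pvBack (pvForwardL [] idx skip r) ≤ r - 1 := by
  induction k using Nat.strong_induction_on with
  | _ k IH =>
    intro r hk idx skip hr
    by_cases h : r > 1
    · rw [pvBack_forward_step idx skip r h]
      have IH' := IH (r - 1).toNat (by omega) (r - 1) rfl
        (PySem.Int.mod (idx + skip) (r - 1)) (skip + 1) (by omega)
      simp only []
      split_ifs with hge <;> omega
    · rw [pvForwardL_nil _ _ _ _ h]
      simp [pvBack]; omega

-- removing index i: looking up the adjusted position in the original list
theorem pvGet_erase (people : List Int) (i : Nat) (hi : i < people.length) (p : Int)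
    (hp0 : 0 ≤ p) (hp : p < ((people.eraseIdx i).length : Int)) :
    PySem.List.pyGet? people (if p ≥ (i : Int) then p + 1 else p) =
      PySem.List.pyGet? (people.eraseIdx i) p := by
  have hlenE : (people.eraseIdx i).length = people.length - 1 := by
    rw [List.length_eraseIdx]; simp [hi]
  have hpN : p.toNat < (people.eraseIdx i).length := by omega
  by_cases hge : p ≥ (i : Int)
  · rw [if_pos hge, PySem.List.pyGet?_of_nonneg _ (by omega : (0:Int) ≤ p + 1)]
    have h1 : (p + 1).toNat < people.length := by omega
    rw [PySem.List.pyGet?_of_nonneg _ hp0, List.getElem?_eq_getElem h1,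
        List.getElem?_eq_getElem hpN, List.getElem_eraseIdx,
        dif_neg (by omega : ¬ p.toNat < i)]
    simp only [show (p + 1).toNat = p.toNat + 1 from by omega]
  · rw [if_neg hge, PySem.List.pyGet?_of_nonneg _ hp0, PySem.List.pyGet?_of_nonneg _ hp0]
    have h1 : p.toNat < people.length := by omega
    rw [List.getElem?_eq_getElem h1, List.getElem?_eq_getElem hpN, List.getElem_eraseIdx,
        dif_pos (by omega : p.toNat < i)]

-- unfolding lemmas for the list twin of A's loop
theorem pvALoopL_pop (people : List Int) (idx skip : Int) (h : people.length > 1)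
    (x : Int) (rest : List Int) (hp : PySem.List.pop? people idx = some (x, rest)) :
    pvALoopL people idx skip =
      if rest.length = 1 then (PySem.List.pyGet? rest 0).getD 0
      else pvALoopL rest (PySem.Int.mod (idx + skip) (rest.length : Int)) (skip + 1) := by
  rw [pvALoopL.eq_def, dif_pos h]
  split
  · simp_all
  · rename_i x' rest' hp'
    rw [hp] at hp'
    cases hp'
    rfl

theorem pvALoopL_one (people : List Int) (idx skip : Int) (h : ¬ people.length > 1) :
    pvALoopL people idx skip = (PySem.List.pyGet? people 0).getD 0 := by
  rw [pvALoopL.eq_def, dif_neg h]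

-- main invariant: A's loop returns the element at B's reconstructed position
theorem pvMain (k : Nat) : ∀ (people : List Int), people.length = k → ∀ (idx skip : Int),
    0 ≤ idx → idx < people.length → 1 ≤ people.length →
    pvALoopL people idx skip =
      (PySem.List.pyGet? people
        (pvBack (pvForwardL [] idx skip (people.length : Int)))).getD 0 := by
  induction k using Nat.strong_induction_on with
  | _ k IH =>
    intro people hk idx skip h0 h1 h2
    by_cases hlen : people.length > 1
    · have hlt : idx.toNat < people.length := by omega
      have hpop : PySem.List.pop? people idx =
          some (people[idx.toNat], people.eraseIdx idx.toNat) := by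
        have := PySem.List.pop?_natCast people idx.toNat hlt
        rwa [show ((idx.toNat : Nat) : Int) = idx by omega] at this
      set rest := people.eraseIdx idx.toNat with hrestdef
      have hlenE : rest.length = people.length - 1 := by
        rw [hrestdef, List.length_eraseIdx]; simp [hlt]
      have hr : (people.length : Int) > 1 := by exact_mod_cast hlen
      have hstep := pvBack_forward_step idx skip (people.length : Int) hr
      have hbounds := pvBack_forward_bounds ((people.length : Int) - 1).toNat
        ((people.length : Int) - 1) rfl
        (PySem.Int.mod (idx + skip) ((people.length : Int) - 1)) (skip + 1) (by omega)
      set p' := pvBack (pvForwardL []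
        (PySem.Int.mod (idx + skip) ((people.length : Int) - 1)) (skip + 1)
        ((people.length : Int) - 1)) with hp'def
      have hcastr : ((people.length : Int) - 1) = (rest.length : Int) := by
        rw [hlenE]; omega
      have hget : PySem.List.pyGet? people (if p' ≥ (idx.toNat : Int) then p' + 1 else p') =
          PySem.List.pyGet? rest p' := by
        apply pvGet_erase people idx.toNat hlt p' hbounds.1
        rw [hlenE]; omega
      have hidxcast : ((idx.toNat : Nat) : Int) = idx := by omega
      rw [hidxcast] at hget
      rw [pvALoopL_pop people idx skip hlen _ _ hpop]
      have hp'2 : p' = pvBack (pvForwardL []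
          (PySem.Int.mod (idx + skip) ((rest.length : Int))) (skip + 1) ((rest.length : Int))) := by
        rw [hp'def, hcastr]
      by_cases hone : rest.length = 1
      · rw [if_pos hone]
        rw [hstep]
        simp only []
        rw [hget]
        -- p' = 0 because 0 ≤ p' ≤ rest.length - 1 = 0
        have : p' = 0 := by
          have := hbounds.2
          rw [hcastr] at this
          omega
        rw [this]
      · rw [if_neg hone]
        have hrest2 : rest.length > 1 := by omega
        have hmodpos : (0 : Int) < (rest.length : Int) := by omega
        have hmod : PySem.Int.mod (idx + skip) ((rest.length : Int)) =
            (idx + skip) % (rest.length : Int) :=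
          PySem.Int.mod_eq_emod_of_pos hmodpos
        have hm0 : 0 ≤ PySem.Int.mod (idx + skip) ((rest.length : Int)) := by
          rw [hmod]; exact Int.emod_nonneg _ (by omega)
        have hm1 : PySem.Int.mod (idx + skip) ((rest.length : Int)) < (rest.length : Int) := by
          rw [hmod]; exact Int.emod_lt_of_pos _ hmodpos
        have hIH := IH rest.length (by omega) rest rfl
          (PySem.Int.mod (idx + skip) ((rest.length : Int))) (skip + 1)
          hm0 (by exact_mod_cast hm1) (by omega)
        rw [hIH, ← hp'2]
        rw [hstep]
        simp only []
        rw [hget]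
    · -- exactly one person: loop body never runs
      have hlen1 : people.length = 1 := by omega
      rw [pvALoopL_one people idx skip hlen]
      rw [pvForwardL_nil _ _ _ _ (by omega)]
      simp [pvBack]

-- the Array forward pass computes the list twin
theorem pvForward_toList (k : Nat) : ∀ (r : Int), r.toNat = k →
    ∀ (idxs : Array Int) (idx skip : Int),
    (pvForward idxs idx skip r).toList = pvForwardL idxs.toList idx skip r := by
  induction k using Nat.strong_induction_on with
  | _ k IH =>
    intro r hk a idx skip
    by_cases h : r > 1
    · conv_lhs => rw [pvForward]
      conv_rhs => rw [pvForwardL]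
      simp only [dif_pos h]
      by_cases h2 : r - 1 = 1
      · simp [h2, Array.toList_push]
      · simp only [if_neg h2]
        rw [IH (r - 1).toNat (by omega) (r - 1) rfl, Array.toList_push]
    · rw [pvForwardL_nil _ _ _ _ h]
      conv_lhs => rw [pvForward]
      simp [dif_neg h]

-- the Array loop of port A computes the list twin (on in-range nonnegative idx)
theorem pvALoop_toList (k : Nat) : ∀ (a : Array Int), a.size = k → ∀ (idx skip : Int),
    0 ≤ idx → idx.toNat < a.size →
    pvALoop a idx skip = pvALoopL a.toList idx skip := by
  induction k using Nat.strong_induction_on with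
  | _ k IH =>
    intro a hk idx skip h0 h1
    have hlistlen : a.toList.length = a.size := Array.length_toList
    by_cases h : a.size > 1
    · rw [pvALoop]
      rw [dif_pos h, dif_pos ⟨h0, h1⟩]
      have hpop : PySem.List.pop? a.toList idx =
          some (a.toList[idx.toNat]'(by omega), a.toList.eraseIdx idx.toNat) := by
        have := PySem.List.pop?_natCast a.toList idx.toNat (by omega)
        rwa [show ((idx.toNat : Nat) : Int) = idx by omega] at this
      rw [pvALoopL_pop a.toList idx skip (by omega) _ _ hpop]
      have htl : (a.eraseIdx idx.toNat h1).toList = a.toList.eraseIdx idx.toNat :=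
        Array.toList_eraseIdx
      have hsz : (a.eraseIdx idx.toNat h1).size = a.size - 1 := Array.size_eraseIdx _ _
      have hlen2 : (a.toList.eraseIdx idx.toNat).length = a.size - 1 := by
        rw [← htl, Array.length_toList, hsz]
      by_cases hone : (a.eraseIdx idx.toNat h1).size = 1
      · rw [if_pos hone, if_pos (by omega)]
        rw [PySem.List.pyGet?_zero, ← htl, Array.getElem?_toList]
      · rw [if_neg hone, if_neg (by omega)]
        have hszpos : (0 : Int) < ((a.eraseIdx idx.toNat h1).size : Int) := by omega
        have hmod : PySem.Int.mod (idx + skip) (((a.eraseIdx idx.toNat h1).size : Int)) =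
            (idx + skip) % ((a.eraseIdx idx.toNat h1).size : Int) :=
          PySem.Int.mod_eq_emod_of_pos hszpos
        have hm0 : 0 ≤ PySem.Int.mod (idx + skip) (((a.eraseIdx idx.toNat h1).size : Int)) := by
          rw [hmod]; exact Int.emod_nonneg _ (by omega)
        have hm1 : PySem.Int.mod (idx + skip) (((a.eraseIdx idx.toNat h1).size : Int)) <
            ((a.eraseIdx idx.toNat h1).size : Int) := by
          rw [hmod]; exact Int.emod_lt_of_pos _ hszpos
        rw [IH (a.size - 1) (by omega) (a.eraseIdx idx.toNat h1) (by omega) _ (skip + 1)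
            hm0 (by omega), htl]
        have hcast : (((a.eraseIdx idx.toNat h1).size : Nat) : Int) =
            (((a.toList.eraseIdx idx.toNat).length : Nat) : Int) := by omega
        rw [hcast]
    · rw [pvALoop]
      rw [dif_neg h, pvALoopL_one _ _ _ (by omega)]
      rw [PySem.List.pyGet?_zero, Array.getElem?_toList]

-- ===== VERDICT =====
theorem leftover_bruiteforce_spec : Claim_equal_leftover_bruiteforce := by
  intro n _ hpre
  unfold Pre_leftover_bruiteforce at hpre
  unfold Spec_leftover_bruiteforce leftover_bruiteforce leftover_bruiteforce_alt
  have hlen : (PySem.List.pyRange 1 (n + 1) 1).length = n.toNat := by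
    rw [PySem.List.length_pyRange_one]; congr 1; omega
  have hsz : (PySem.List.pyRange 1 (n + 1) 1).toArray.size = n.toNat := by
    rw [List.size_toArray, hlen]
  rw [pvALoop_toList (PySem.List.pyRange 1 (n + 1) 1).toArray.size
      (PySem.List.pyRange 1 (n + 1) 1).toArray rfl 0 1 (by omega) (by omega)]
  rw [← Array.foldr_toList, pvForward_toList n.toNat n rfl]
  rw [show (#[] : Array Int).toList = ([] : List Int) from rfl]
  simp only [List.toList_toArray]
  have hcast : ((PySem.List.pyRange 1 (n + 1) 1).length : Int) = n := by
    rw [hlen]; omega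
  have h2 : 1 ≤ (PySem.List.pyRange 1 (n + 1) 1).length := by omega
  rw [pvMain (PySem.List.pyRange 1 (n + 1) 1).length (PySem.List.pyRange 1 (n + 1) 1) rfl 0 1
      (by omega) (by exact_mod_cast h2) h2]
  rw [hcast]
  have hbounds := pvBack_forward_bounds n.toNat n (rfl) 0 1 hpre
  set p := pvBack (pvForwardL [] 0 1 n) with hpdef
  have hpN : p.toNat < (PySem.List.pyRange 1 (n + 1) 1).length := by omega
  rw [PySem.List.pyGet?_of_nonneg _ hbounds.1, List.getElem?_eq_getElem hpN,
      PySem.List.getElem_pyRange_one]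
  simp [pvBack] at hpdef ⊢
  omega
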